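-- pv_equiv track=rewrite | github.com/ministryofjustice/opg-use-an-lpa | lambda-functions/upload-statistics/app/upload_statistics.py | get_formatted_key
-- ===== SOURCE A (Python) =====
-- def get_formatted_key(key):
--     """
--     Makes stat names more user-friendly by replacing HTTP status codes with their corresponding names.
--
--     Args:
--         key (str): The key to be formatted.
--
--     Returns:
--         str: The formatted key.
--     """
--     replacements = {
--         '404_': 'not_found_',
--         '401_': 'unauthorised_',
--         '403_': 'forbidden_',
--         ' ': '_',
--         '-': '_'
--     }
--     for replace_from, replace_to in replacements.items():
--         key = key.replace(replace_from, replace_to)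
--
--     return key.lower()
-- ===== SOURCE B (Python) =====
-- def get_formatted_key(key):
--     """
--     Makes stat names more user-friendly by replacing HTTP status codes with their corresponding names.
--
--     One left-to-right pass substituting each matched token, instead of five
--     full-string .replace passes.
--     """
--     replacements = {
--         '404_': 'not_found_',
--         '401_': 'unauthorised_',
--         '403_': 'forbidden_',
--     }
--     out = []
--     i = 0
--     n = len(key)
--     while i < n:
--         tok = key[i:i + 4]
--         if tok in replacements:
--             out.append(replacements[tok])
--             i += 4
--         elif key[i] in ' -':
--             out.append('_')
--             i += 1
--         else:
--             out.append(key[i])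
--             i += 1
--     return ''.join(out).lower()
-- ===== Notes on version B (the rewrite author's own statement) =====
-- stated objective: alternative
-- what changed: Replaces the five sequential full-string .replace passes with a single left-to-right scan that substitutes each matched token ('404_'/'401_'/'403_'/' '/'-') in one pass over the input.
import Mathlib
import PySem

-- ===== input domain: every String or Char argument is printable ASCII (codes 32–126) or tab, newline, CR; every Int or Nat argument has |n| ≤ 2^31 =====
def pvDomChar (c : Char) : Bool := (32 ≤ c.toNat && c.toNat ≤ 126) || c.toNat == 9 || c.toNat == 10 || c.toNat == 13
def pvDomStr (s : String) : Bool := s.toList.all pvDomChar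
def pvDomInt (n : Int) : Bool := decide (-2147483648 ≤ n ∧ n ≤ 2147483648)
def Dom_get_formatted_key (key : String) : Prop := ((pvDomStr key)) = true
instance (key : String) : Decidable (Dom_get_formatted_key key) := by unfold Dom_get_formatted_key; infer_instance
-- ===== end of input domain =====

-- B replaces A's five sequential full-string .replace passes with one left-to-right scan
-- substituting each matched token; equality of the return values is proved below (alternative).


-- ===== PORT A =====
-- the five replace passes of A's dict loop, in dict insertion order, then .lower()
def get_formatted_key (key : String) : String :=
  let key := PySem.Str.replace key "404_" "not_found_"
  let key := PySem.Str.replace key "401_" "unauthorised_"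
  let key := PySem.Str.replace key "403_" "forbidden_"
  let key := PySem.Str.replace key " " "_"
  let key := PySem.Str.replace key "-" "_"
  PySem.Str.lower key

-- ===== PORT B =====
-- B's while loop: one left-to-right scan; tok = key[i:i+4] matched against the three
-- status-code tokens, else single-char handling of ' '/'-'; i advances by 4 or by 1,
-- ported as structural recursion (take/drop) on the character list.
def scanGo : List Char → List Char
  | [] => []
  | c :: t =>
    let tok := (c :: t).take 4
    if tok = ['4', '0', '4', '_'] then
      ['n', 'o', 't', '_', 'f', 'o', 'u', 'n', 'd', '_'] ++ scanGo ((c :: t).drop 4)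
    else if tok = ['4', '0', '1', '_'] then
      ['u', 'n', 'a', 'u', 't', 'h', 'o', 'r', 'i', 's', 'e', 'd', '_'] ++ scanGo ((c :: t).drop 4)
    else if tok = ['4', '0', '3', '_'] then
      ['f', 'o', 'r', 'b', 'i', 'd', 'd', 'e', 'n', '_'] ++ scanGo ((c :: t).drop 4)
    else if c = ' ' ∨ c = '-' then
      '_' :: scanGo t
    else
      c :: scanGo t
  termination_by l => l.length
  decreasing_by all_goals (simp; try omega)

def get_formatted_key_alt (key : String) : String :=
  PySem.Str.lower (String.ofList (scanGo key.toList))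

-- ===== PRECONDITION & SPEC =====
def Spec_get_formatted_key (key : String) (out : String) : Prop := out = get_formatted_key_alt key
instance (key : String) (out : String) : Decidable (Spec_get_formatted_key key out) := by unfold Spec_get_formatted_key; infer_instance

-- ===== CLAIM (what is proved, stated in full; the proofs are below) =====
def Claim_equal_get_formatted_key : Prop := ∀ (key : String), Dom_get_formatted_key key → Spec_get_formatted_key key (get_formatted_key key)

-- ===== LEMMAS AND PROOFS =====

-- clean recursive form of PySem.Chars.replace (for a non-empty pattern)
def rep (old new : List Char) : List Char → List Char
  | [] => []
  | c :: t =>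
    if h : old ≠ [] ∧ old.isPrefixOf (c :: t) = true then
      new ++ rep old new ((c :: t).drop old.length)
    else
      c :: rep old new t
  termination_by l => l.length
  decreasing_by
  · have h1 : old.length ≠ 0 := by
      intro h0
      exact h.1 (List.eq_nil_of_length_eq_zero h0)
    simp
    omega
  · simp

theorem rep_nil (old new : List Char) : rep old new [] = [] := by simp [rep]

theorem replace_go_eq_rep (old new : List Char) (hold : old ≠ []) :
    ∀ (fuel : Nat) (l acc : List Char), l.length ≤ fuel →
      PySem.Chars.replace.go old new fuel l acc = acc.reverse ++ rep old new l := by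
  intro fuel
  induction fuel with
  | zero =>
    intro l acc hl
    have : l = [] := by cases l <;> simp_all
    subst this
    rw [PySem.Chars.replace.go.eq_def]
    simp [rep_nil]
  | succ n ih =>
    intro l acc hl
    match l with
    | [] => rw [PySem.Chars.replace.go.eq_def]; simp [rep_nil]
    | c :: t =>
      rw [PySem.Chars.replace.go.eq_def]
      by_cases hp : old.isPrefixOf (c :: t) = true
      · have hlen : old.length ≠ 0 := by
          intro h0
          exact hold (List.eq_nil_of_length_eq_zero h0)
        have hdrop : ((c :: t).drop old.length).length ≤ n := by
          simp at hl ⊢; omega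
        simp only [hp, if_true]
        rw [ih _ _ hdrop]
        have : rep old new (c :: t) = new ++ rep old new ((c :: t).drop old.length) := by
          rw [rep]; simp [hold, hp]
        rw [this]
        simp
      · have ht : t.length ≤ n := by simp at hl; omega
        simp only [hp]
        rw [ih _ _ ht]
        have : rep old new (c :: t) = c :: rep old new t := by
          rw [rep]; simp [hp]
        rw [this]
        simp

theorem replace_eq_rep (s old new : List Char) (hold : old ≠ []) :
    PySem.Chars.replace s old new = rep old new s := by
  rw [PySem.Chars.replace]
  have : old.isEmpty = false := by simpa using hold
  rw [this]
  simpa using replace_go_eq_rep old new hold s.length s [] le_rfl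

theorem rep_match (old new l : List Char) (hold : old ≠ []) (hp : old.isPrefixOf l = true) :
    rep old new l = new ++ rep old new (l.drop old.length) := by
  match l with
  | [] =>
    exfalso
    have := List.isPrefixOf_iff_prefix.mp hp
    simp at this
    exact hold this
  | c :: t => rw [rep]; simp [hold, hp]

theorem rep_skip (old new : List Char) (c : Char) (t : List Char)
    (h : ¬ old <+: (c :: t)) :
    rep old new (c :: t) = c :: rep old new t := by
  rw [rep]
  have : old.isPrefixOf (c :: t) = false := by
    rw [← Bool.not_eq_true, List.isPrefixOf_iff_prefix]
    exact h
  simp [this]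

theorem rep_skip_head (o : Char) (old' new : List Char) (c : Char) (t : List Char)
    (h : o ≠ c) : rep (o :: old') new (c :: t) = c :: rep (o :: old') new t := by
  apply rep_skip
  intro hp
  exact h (List.cons_prefix_cons.mp hp).1

theorem rep_append (o : Char) (old' new u x : List Char) (h : ∀ c ∈ u, c ≠ o) :
    rep (o :: old') new (u ++ x) = u ++ rep (o :: old') new x := by
  induction u with
  | nil => simp
  | cons c u' ih =>
    have hc : o ≠ c := fun he => (h c (by simp)) he.symm
    simp only [List.cons_append]
    rw [rep_skip_head _ _ _ _ _ hc, ih (fun d hd => h d (by simp [hd]))]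

-- a prefix window containing none of the replacement's head char survives rep backwards
theorem prefix_of_prefix_rep (old : List Char) (nh : Char) (new' : List Char) :
    ∀ (n : Nat) (x w : List Char), x.length ≤ n → (∀ c ∈ w, c ≠ nh) →
      w <+: rep old (nh :: new') x → w <+: x := by
  intro n
  induction n with
  | zero =>
    intro x w hx _ hp
    have : x = [] := by cases x <;> simp_all
    subst this
    simpa [rep_nil] using hp
  | succ n ih =>
    intro x w hx hw hp
    match x with
    | [] => simpa [rep_nil] using hp
    | c :: t =>
      match w with
      | [] => exact List.nil_prefix
      | d :: w' =>
        by_cases hm : old ≠ [] ∧ old.isPrefixOf (c :: t) = true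
        · rw [rep, dif_pos hm, List.cons_append] at hp
          have := (List.cons_prefix_cons.mp hp).1
          exact absurd this (hw d (by simp))
        · rw [rep, dif_neg hm] at hp
          obtain ⟨hd, hw'⟩ := List.cons_prefix_cons.mp hp
          have ht : t.length ≤ n := by simp at hx; omega
          have := ih t w' ht (fun e he => hw e (by simp [he])) hw'
          exact List.cons_prefix_cons.mpr ⟨hd, this⟩

-- the replacement tokens and targets, as character lists
def p404 : List Char := ['4', '0', '4', '_']
def p401 : List Char := ['4', '0', '1', '_']
def p403 : List Char := ['4', '0', '3', '_']
def nfL : List Char := ['n', 'o', 't', '_', 'f', 'o', 'u', 'n', 'd', '_']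
def uaL : List Char := ['u', 'n', 'a', 'u', 't', 'h', 'o', 'r', 'i', 's', 'e', 'd', '_']
def fbL : List Char := ['f', 'o', 'r', 'b', 'i', 'd', 'd', 'e', 'n', '_']

-- the composite of A's five passes
def F (l : List Char) : List Char :=
  rep ['-'] ['_'] (rep [' '] ['_'] (rep p403 fbL (rep p401 uaL (rep p404 nfL l))))

-- window corollaries, one per inner pass
theorem window_r1 (w t : List Char) (hw : ∀ c ∈ w, c ≠ 'n') :
    w <+: rep p404 nfL t → w <+: t :=
  prefix_of_prefix_rep p404 'n' ['o', 't', '_', 'f', 'o', 'u', 'n', 'd', '_'] t.length t w le_rfl hw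

theorem window_r2 (w t : List Char) (hw : ∀ c ∈ w, c ≠ 'u') :
    w <+: rep p401 uaL t → w <+: t :=
  prefix_of_prefix_rep p401 'u' ['n', 'a', 'u', 't', 'h', 'o', 'r', 'i', 's', 'e', 'd', '_'] t.length t w le_rfl hw

-- case equations for F
theorem F_nil : F [] = [] := by simp [F, rep_nil]

theorem F_404 (t : List Char) : F ('4' :: '0' :: '4' :: '_' :: t) = nfL ++ F t := by
  unfold F p404 p401 p403 nfL uaL fbL
  rw [rep_match ['4', '0', '4', '_'] _ _ (by decide) (by simp [List.isPrefixOf])]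
  rw [show List.drop (['4', '0', '4', '_'].length) ('4' :: '0' :: '4' :: '_' :: t) = t from rfl]
  rw [rep_append '4' _ _ ['n', 'o', 't', '_', 'f', 'o', 'u', 'n', 'd', '_'] _ (by simp),
      rep_append '4' _ _ ['n', 'o', 't', '_', 'f', 'o', 'u', 'n', 'd', '_'] _ (by simp),
      rep_append ' ' _ _ ['n', 'o', 't', '_', 'f', 'o', 'u', 'n', 'd', '_'] _ (by simp),
      rep_append '-' _ _ ['n', 'o', 't', '_', 'f', 'o', 'u', 'n', 'd', '_'] _ (by simp)]

theorem F_401 (t : List Char) : F ('4' :: '0' :: '1' :: '_' :: t) = uaL ++ F t := by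
  unfold F p404 p401 p403 nfL uaL fbL
  rw [rep_skip _ _ _ _ (by simp [List.cons_prefix_cons]),
      rep_skip_head '4' _ _ '0' _ (by decide), rep_skip_head '4' _ _ '1' _ (by decide),
      rep_skip_head '4' _ _ '_' _ (by decide)]
  rw [rep_match ['4', '0', '1', '_'] _ _ (by decide) (by simp [List.isPrefixOf])]
  rw [show List.drop (['4', '0', '1', '_'].length)
        ('4' :: '0' :: '1' :: '_' :: rep ['4', '0', '4', '_'] ['n', 'o', 't', '_', 'f', 'o', 'u', 'n', 'd', '_'] t)
      = rep ['4', '0', '4', '_'] ['n', 'o', 't', '_', 'f', 'o', 'u', 'n', 'd', '_'] t from rfl]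
  rw [rep_append '4' _ _ ['u', 'n', 'a', 'u', 't', 'h', 'o', 'r', 'i', 's', 'e', 'd', '_'] _ (by simp), rep_append ' ' _ _ ['u', 'n', 'a', 'u', 't', 'h', 'o', 'r', 'i', 's', 'e', 'd', '_'] _ (by simp),
      rep_append '-' _ _ ['u', 'n', 'a', 'u', 't', 'h', 'o', 'r', 'i', 's', 'e', 'd', '_'] _ (by simp)]

theorem F_403 (t : List Char) : F ('4' :: '0' :: '3' :: '_' :: t) = fbL ++ F t := by
  unfold F p404 p401 p403 nfL uaL fbL
  rw [rep_skip _ _ _ _ (by simp [List.cons_prefix_cons]),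
      rep_skip_head '4' _ _ '0' _ (by decide), rep_skip_head '4' _ _ '3' _ (by decide),
      rep_skip_head '4' _ _ '_' _ (by decide)]
  rw [rep_skip _ _ _ _ (by simp [List.cons_prefix_cons]),
      rep_skip_head '4' _ _ '0' _ (by decide), rep_skip_head '4' _ _ '3' _ (by decide),
      rep_skip_head '4' _ _ '_' _ (by decide)]
  rw [rep_match ['4', '0', '3', '_'] _ _ (by decide) (by simp [List.isPrefixOf])]
  rw [show List.drop (['4', '0', '3', '_'].length)
        ('4' :: '0' :: '3' :: '_' ::
          rep ['4', '0', '1', '_'] ['u', 'n', 'a', 'u', 't', 'h', 'o', 'r', 'i', 's', 'e', 'd', '_']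
            (rep ['4', '0', '4', '_'] ['n', 'o', 't', '_', 'f', 'o', 'u', 'n', 'd', '_'] t))
      = rep ['4', '0', '1', '_'] ['u', 'n', 'a', 'u', 't', 'h', 'o', 'r', 'i', 's', 'e', 'd', '_']
          (rep ['4', '0', '4', '_'] ['n', 'o', 't', '_', 'f', 'o', 'u', 'n', 'd', '_'] t) from rfl]
  rw [rep_append ' ' _ _ ['f', 'o', 'r', 'b', 'i', 'd', 'd', 'e', 'n', '_'] _ (by simp), rep_append '-' _ _ ['f', 'o', 'r', 'b', 'i', 'd', 'd', 'e', 'n', '_'] _ (by simp)]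

theorem F_space (t : List Char) : F (' ' :: t) = '_' :: F t := by
  unfold F p404 p401 p403 nfL uaL fbL
  rw [rep_skip_head '4' _ _ ' ' _ (by decide), rep_skip_head '4' _ _ ' ' _ (by decide),
      rep_skip_head '4' _ _ ' ' _ (by decide)]
  rw [rep_match [' '] _ _ (by decide) (by simp [List.isPrefixOf])]
  rw [show List.drop ([' '].length)
        (' ' ::
          rep ['4', '0', '3', '_'] ['f', 'o', 'r', 'b', 'i', 'd', 'd', 'e', 'n', '_']
            (rep ['4', '0', '1', '_'] ['u', 'n', 'a', 'u', 't', 'h', 'o', 'r', 'i', 's', 'e', 'd', '_']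
              (rep ['4', '0', '4', '_'] ['n', 'o', 't', '_', 'f', 'o', 'u', 'n', 'd', '_'] t)))
      = rep ['4', '0', '3', '_'] ['f', 'o', 'r', 'b', 'i', 'd', 'd', 'e', 'n', '_']
          (rep ['4', '0', '1', '_'] ['u', 'n', 'a', 'u', 't', 'h', 'o', 'r', 'i', 's', 'e', 'd', '_']
            (rep ['4', '0', '4', '_'] ['n', 'o', 't', '_', 'f', 'o', 'u', 'n', 'd', '_'] t)) from rfl]
  rw [List.singleton_append, rep_skip_head '-' _ _ '_' _ (by decide)]

theorem F_dash (t : List Char) : F ('-' :: t) = '_' :: F t := by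
  unfold F p404 p401 p403 nfL uaL fbL
  rw [rep_skip_head '4' _ _ '-' _ (by decide), rep_skip_head '4' _ _ '-' _ (by decide),
      rep_skip_head '4' _ _ '-' _ (by decide), rep_skip_head ' ' _ _ '-' _ (by decide)]
  rw [rep_match ['-'] _ _ (by decide) (by simp [List.isPrefixOf])]
  rfl

theorem F_other (c : Char) (t : List Char)
    (h4 : ¬ p404 <+: (c :: t)) (h1 : ¬ p401 <+: (c :: t)) (h3 : ¬ p403 <+: (c :: t))
    (hsp : c ≠ ' ') (hda : c ≠ '-') : F (c :: t) = c :: F t := by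
  by_cases hc4 : c = '4'
  · subst hc4
    unfold F p404 p401 p403 nfL uaL fbL at *
    have s1 : ¬ ['4', '0', '1', '_'] <+:
        ('4' :: rep ['4', '0', '4', '_'] ['n', 'o', 't', '_', 'f', 'o', 'u', 'n', 'd', '_'] t) := by
      intro hp
      obtain ⟨-, hw⟩ := List.cons_prefix_cons.mp hp
      have := window_r1 ['0', '1', '_'] t (by simp) hw
      exact h1 (List.cons_prefix_cons.mpr ⟨rfl, this⟩)
    have s2 : ¬ ['4', '0', '3', '_'] <+:
        ('4' :: rep ['4', '0', '1', '_'] ['u', 'n', 'a', 'u', 't', 'h', 'o', 'r', 'i', 's', 'e', 'd', '_']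
          (rep ['4', '0', '4', '_'] ['n', 'o', 't', '_', 'f', 'o', 'u', 'n', 'd', '_'] t)) := by
      intro hp
      obtain ⟨-, hw⟩ := List.cons_prefix_cons.mp hp
      have := window_r1 ['0', '3', '_'] t (by simp) (window_r2 ['0', '3', '_'] _ (by simp) hw)
      exact h3 (List.cons_prefix_cons.mpr ⟨rfl, this⟩)
    rw [rep_skip _ _ _ _ h4, rep_skip _ _ _ _ s1, rep_skip _ _ _ _ s2,
        rep_skip_head ' ' _ _ '4' _ (by decide), rep_skip_head '-' _ _ '4' _ (by decide)]
  · unfold F p404 p401 p403 nfL uaL fbL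
    have g4 : ('4' : Char) ≠ c := fun he => hc4 he.symm
    rw [rep_skip_head '4' _ _ c _ g4, rep_skip_head '4' _ _ c _ g4,
        rep_skip_head '4' _ _ c _ g4, rep_skip_head ' ' _ _ c _ (fun he => hsp he.symm),
        rep_skip_head '-' _ _ c _ (fun he => hda he.symm)]

-- case equations for scanGo
theorem scanGo_404 (t : List Char) :
    scanGo ('4' :: '0' :: '4' :: '_' :: t) = nfL ++ scanGo t := by
  rw [scanGo]; simp [nfL]

theorem scanGo_401 (t : List Char) :
    scanGo ('4' :: '0' :: '1' :: '_' :: t) = uaL ++ scanGo t := by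
  rw [scanGo]; simp [uaL]

theorem scanGo_403 (t : List Char) :
    scanGo ('4' :: '0' :: '3' :: '_' :: t) = fbL ++ scanGo t := by
  rw [scanGo]; simp [fbL]

theorem take4_ne (l p : List Char) (h : ¬ p <+: l) : ¬ l.take 4 = p := by
  intro he
  exact h (by rw [← he]; exact List.take_prefix _ _)

theorem scanGo_space_dash (c : Char) (t : List Char) (hsp : c = ' ' ∨ c = '-') :
    scanGo (c :: t) = '_' :: scanGo t := by
  rcases hsp with h | h <;> subst h <;>
  · rw [scanGo]
    rw [if_neg (take4_ne _ _ (by simp [List.cons_prefix_cons])),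
        if_neg (take4_ne _ _ (by simp [List.cons_prefix_cons])),
        if_neg (take4_ne _ _ (by simp [List.cons_prefix_cons])),
        if_pos (by simp)]

theorem scanGo_other (c : Char) (t : List Char)
    (h4 : ¬ p404 <+: (c :: t)) (h1 : ¬ p401 <+: (c :: t)) (h3 : ¬ p403 <+: (c :: t))
    (hsp : c ≠ ' ') (hda : c ≠ '-') : scanGo (c :: t) = c :: scanGo t := by
  unfold p404 at h4
  unfold p401 at h1
  unfold p403 at h3
  rw [scanGo]
  rw [if_neg (take4_ne _ _ h4), if_neg (take4_ne _ _ h1),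
      if_neg (take4_ne _ _ h3), if_neg (by simp [hsp, hda])]

-- the heart: five sequential replace passes = one scan
theorem five_eq_scan : ∀ (n : Nat) (l : List Char), l.length ≤ n → F l = scanGo l := by
  intro n
  induction n with
  | zero =>
    intro l hl
    have : l = [] := by cases l <;> simp_all
    subst this
    rw [F_nil, scanGo]
  | succ n ih =>
    intro l hl
    match l with
    | [] => rw [F_nil, scanGo]
    | c :: t =>
      by_cases h404 : p404 <+: (c :: t)
      · obtain ⟨t4, ht4⟩ := h404
        have hl4 : (c :: t) = '4' :: '0' :: '4' :: '_' :: t4 := by rw [← ht4]; rfl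
        have hlen : t4.length ≤ n := by
          have := congrArg List.length hl4
          simp at this hl; omega
        rw [hl4, F_404, scanGo_404, ih t4 hlen]
      · by_cases h401 : p401 <+: (c :: t)
        · obtain ⟨t4, ht4⟩ := h401
          have hl4 : (c :: t) = '4' :: '0' :: '1' :: '_' :: t4 := by rw [← ht4]; rfl
          have hlen : t4.length ≤ n := by
            have := congrArg List.length hl4
            simp at this hl; omega
          rw [hl4, F_401, scanGo_401, ih t4 hlen]
        · by_cases h403 : p403 <+: (c :: t)
          · obtain ⟨t4, ht4⟩ := h403
            have hl4 : (c :: t) = '4' :: '0' :: '3' :: '_' :: t4 := by rw [← ht4]; rfl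
            have hlen : t4.length ≤ n := by
              have := congrArg List.length hl4
              simp at this hl; omega
            rw [hl4, F_403, scanGo_403, ih t4 hlen]
          · have hlen : t.length ≤ n := by simp at hl; omega
            by_cases hsp : c = ' ' ∨ c = '-'
            · rw [scanGo_space_dash c t hsp]
              rcases hsp with h | h <;> subst h
              · rw [F_space, ih t hlen]
              · rw [F_dash, ih t hlen]
            · have hs1 : c ≠ ' ' := fun h => hsp (Or.inl h)
              have hs2 : c ≠ '-' := fun h => hsp (Or.inr h)
              rw [F_other c t h404 h401 h403 hs1 hs2,
                  scanGo_other c t h404 h401 h403 hs1 hs2, ih t hlen]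

-- ===== VERDICT (by name: the statement is the Claim_ definition above) =====
theorem get_formatted_key_spec : Claim_equal_get_formatted_key := by
  intro key _
  unfold Spec_get_formatted_key get_formatted_key get_formatted_key_alt
  apply String.toList_inj.mp
  simp only [PySem.Str.toList_lower, PySem.Str.toList_replace]
  rw [replace_eq_rep _ _ _ (by decide), replace_eq_rep _ _ _ (by decide),
      replace_eq_rep _ _ _ (by decide), replace_eq_rep _ _ _ (by decide),
      replace_eq_rep _ _ _ (by decide)]
  rw [show ("404_".toList) = p404 from by decide, show ("401_".toList) = p401 from by decide,
      show ("403_".toList) = p403 from by decide,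
      show ("not_found_".toList) = nfL from by decide,
      show ("unauthorised_".toList) = uaL from by decide,
      show ("forbidden_".toList) = fbL from by decide,
      show (" ".toList) = [' '] from by decide, show ("-".toList) = ['-'] from by decide,
      show ("_".toList) = ['_'] from by decide]
  rw [show rep ['-'] ['_'] (rep [' '] ['_'] (rep p403 fbL (rep p401 uaL (rep p404 nfL key.toList))))
      = F key.toList from rfl]
  rw [five_eq_scan key.toList.length key.toList le_rfl]
  rw [String.toList_ofList]
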